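-- pv_equiv track=rewrite | github.com/fabiomelis/MyStrenght | new_shit.py | converti_a_lettera
-- ===== SOURCE A (Python) =====
-- def converti_a_lettera(rating):
--     # Definisci i range e le relative lettere
--     intervalli = [
--         (100, 'ELITE'), (95, 'S'), (90, 'S-'),
--         (85, 'A+'), (80, 'A'), (75, 'A-'),
--         (70, 'B+'), (65, 'B'), (60, 'B-'),
--         (55, 'C+'), (50, 'C'), (45, 'C-'),
--         (40, 'D+'), (35, 'D'), (30, 'D-'),
--         (0, 'NULL')
--     ]
--
--     # Trova la lettera corrispondente al rating
--     for limite, lettera in intervalli: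
--         if rating >= limite:
--             return lettera
-- ===== SOURCE B (Python) =====
-- _LETTERS = ['D-', 'D', 'D+', 'C-', 'C', 'C+', 'B-', 'B',
--             'B+', 'A-', 'A', 'A+', 'S-', 'S']
--
-- def converti_a_lettera(rating):
--     # Closed-form bucket arithmetic instead of a linear first-match scan.
--     if rating < 0:
--         return None
--     if rating < 30:
--         return 'NULL'
--     if rating >= 100:
--         return 'ELITE'
--     return _LETTERS[rating // 5 - 6]
-- ===== Notes on version B (the rewrite author's own statement) =====
-- stated objective: simpler
-- what changed: Replaces the 16-entry first-match threshold scan by closed-form bucket arithmetic: two boundary guards plus a direct table lookup at index rating//5 - 6.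
-- outside the precondition, e.g. on converti_a_lettera(-3): A returns None, B returns None
import Mathlib
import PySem

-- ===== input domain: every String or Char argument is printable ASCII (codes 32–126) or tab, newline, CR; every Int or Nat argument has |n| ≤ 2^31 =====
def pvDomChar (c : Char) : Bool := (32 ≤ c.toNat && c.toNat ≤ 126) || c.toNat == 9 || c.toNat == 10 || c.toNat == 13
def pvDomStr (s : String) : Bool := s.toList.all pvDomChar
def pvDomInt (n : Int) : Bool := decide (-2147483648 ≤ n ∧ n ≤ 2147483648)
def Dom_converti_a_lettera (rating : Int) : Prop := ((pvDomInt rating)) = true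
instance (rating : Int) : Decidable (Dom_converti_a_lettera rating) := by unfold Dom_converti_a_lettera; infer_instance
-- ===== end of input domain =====

-- B replaces A's 16-entry first-match threshold scan by closed-form bucket arithmetic
-- (two boundary guards + one table lookup at rating // 5 - 6); objective: simpler.

-- ===== PORT A =====
def pvIntervalli : List (Int × String) :=
  [(100, "ELITE"), (95, "S"), (90, "S-"),
   (85, "A+"), (80, "A"), (75, "A-"),
   (70, "B+"), (65, "B"), (60, "B-"),
   (55, "C+"), (50, "C"), (45, "C-"),
   (40, "D+"), (35, "D"), (30, "D-"),
   (0, "NULL")]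

-- first-match scan of A's loop; "" is the (never-returned-under-Pre_) fall-through
def pvScan : List (Int × String) → Int → String
  | [], _ => ""
  | p :: rest, r => if r ≥ p.1 then p.2 else pvScan rest r

def converti_a_lettera (rating : Int) : String :=
  pvScan pvIntervalli rating

-- ===== PORT B =====
def pvLetters : List String :=
  ["D-", "D", "D+", "C-", "C", "C+", "B-", "B",
   "B+", "A-", "A", "A+", "S-", "S"]

def converti_a_lettera_alt (rating : Int) : String :=
  if rating < 0 then ""   -- Python B returns None here; outside Pre_
  else if rating < 30 then "NULL"
  else if rating ≥ 100 then "ELITE"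
  else PySem.List.pyGetD pvLetters (PySem.Int.floordiv rating 5 - 6) ""

-- ===== PRECONDITION & SPEC =====
-- Pre_ excludes rating < 0, where Python A falls through its loop and returns None,
-- which is not a value of the declared String return type (B returns None there too).
def Pre_converti_a_lettera (rating : Int) : Prop := 0 ≤ rating
instance (rating : Int) : Decidable (Pre_converti_a_lettera rating) := by unfold Pre_converti_a_lettera; infer_instance
def pvWitness_converti_a_lettera : Int := 42

def Spec_converti_a_lettera (rating : Int) (out : String) : Prop := out = converti_a_lettera_alt rating
instance (rating : Int) (out : String) : Decidable (Spec_converti_a_lettera rating out) := by unfold Spec_converti_a_lettera; infer_instance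

-- ===== CLAIM (what is proved, stated in full; the proofs are below) =====
def Claim_equal_converti_a_lettera : Prop := ∀ (rating : Int), Dom_converti_a_lettera rating → Pre_converti_a_lettera rating → Spec_converti_a_lettera rating (converti_a_lettera rating)

-- ===== LEMMAS AND PROOFS =====

theorem scan_nil (r : Int) : pvScan [] r = "" := rfl

theorem scan_cons (p : Int × String) (rest : List (Int × String)) (r : Int) :
    pvScan (p :: rest) r = if r ≥ p.1 then p.2 else pvScan rest r := rfl

theorem pv_main (r : Int) (h : 0 ≤ r) :
    pvScan pvIntervalli r = converti_a_lettera_alt r := by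
  simp only [pvIntervalli, scan_cons, scan_nil, converti_a_lettera_alt]
  by_cases h30 : r < 30
  · rw [if_neg (show ¬ r ≥ 100 by omega), if_neg (show ¬ r ≥ 95 by omega), if_neg (show ¬ r ≥ 90 by omega), if_neg (show ¬ r ≥ 85 by omega), if_neg (show ¬ r ≥ 80 by omega), if_neg (show ¬ r ≥ 75 by omega), if_neg (show ¬ r ≥ 70 by omega), if_neg (show ¬ r ≥ 65 by omega), if_neg (show ¬ r ≥ 60 by omega), if_neg (show ¬ r ≥ 55 by omega), if_neg (show ¬ r ≥ 50 by omega), if_neg (show ¬ r ≥ 45 by omega), if_neg (show ¬ r ≥ 40 by omega), if_neg (show ¬ r ≥ 35 by omega), if_neg (show ¬ r ≥ 30 by omega), if_pos (show r ≥ 0 by omega),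
        if_neg (show ¬ r < 0 by omega), if_pos h30]
  · by_cases h100 : r ≥ 100
    · rw [if_pos h100, if_neg (show ¬ r < 0 by omega), if_neg (show ¬ r < 30 by omega),
          if_pos h100]
    · by_cases hb6 : r < 35
      · rw [if_neg (show ¬ r ≥ 100 by omega), if_neg (show ¬ r ≥ 95 by omega), if_neg (show ¬ r ≥ 90 by omega), if_neg (show ¬ r ≥ 85 by omega), if_neg (show ¬ r ≥ 80 by omega), if_neg (show ¬ r ≥ 75 by omega), if_neg (show ¬ r ≥ 70 by omega), if_neg (show ¬ r ≥ 65 by omega), if_neg (show ¬ r ≥ 60 by omega), if_neg (show ¬ r ≥ 55 by omega), if_neg (show ¬ r ≥ 50 by omega), if_neg (show ¬ r ≥ 45 by omega), if_neg (show ¬ r ≥ 40 by omega), if_neg (show ¬ r ≥ 35 by omega), if_pos (show r ≥ 30 by omega),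
            if_neg (show ¬ r < 0 by omega), if_neg (show ¬ r < 30 by omega),
            if_neg (show ¬ r ≥ 100 by omega),
            show PySem.Int.floordiv r 5 = 6 from (PySem.Int.floordiv_eq_iff_of_pos (by omega)).mpr (by omega)]
        decide
      · by_cases hb7 : r < 40
        · rw [if_neg (show ¬ r ≥ 100 by omega), if_neg (show ¬ r ≥ 95 by omega), if_neg (show ¬ r ≥ 90 by omega), if_neg (show ¬ r ≥ 85 by omega), if_neg (show ¬ r ≥ 80 by omega), if_neg (show ¬ r ≥ 75 by omega), if_neg (show ¬ r ≥ 70 by omega), if_neg (show ¬ r ≥ 65 by omega), if_neg (show ¬ r ≥ 60 by omega), if_neg (show ¬ r ≥ 55 by omega), if_neg (show ¬ r ≥ 50 by omega), if_neg (show ¬ r ≥ 45 by omega), if_neg (show ¬ r ≥ 40 by omega), if_pos (show r ≥ 35 by omega),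
              if_neg (show ¬ r < 0 by omega), if_neg (show ¬ r < 30 by omega),
              if_neg (show ¬ r ≥ 100 by omega),
              show PySem.Int.floordiv r 5 = 7 from (PySem.Int.floordiv_eq_iff_of_pos (by omega)).mpr (by omega)]
          decide
        · by_cases hb8 : r < 45
          · rw [if_neg (show ¬ r ≥ 100 by omega), if_neg (show ¬ r ≥ 95 by omega), if_neg (show ¬ r ≥ 90 by omega), if_neg (show ¬ r ≥ 85 by omega), if_neg (show ¬ r ≥ 80 by omega), if_neg (show ¬ r ≥ 75 by omega), if_neg (show ¬ r ≥ 70 by omega), if_neg (show ¬ r ≥ 65 by omega), if_neg (show ¬ r ≥ 60 by omega), if_neg (show ¬ r ≥ 55 by omega), if_neg (show ¬ r ≥ 50 by omega), if_neg (show ¬ r ≥ 45 by omega), if_pos (show r ≥ 40 by omega),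
                if_neg (show ¬ r < 0 by omega), if_neg (show ¬ r < 30 by omega),
                if_neg (show ¬ r ≥ 100 by omega),
                show PySem.Int.floordiv r 5 = 8 from (PySem.Int.floordiv_eq_iff_of_pos (by omega)).mpr (by omega)]
            decide
          · by_cases hb9 : r < 50
            · rw [if_neg (show ¬ r ≥ 100 by omega), if_neg (show ¬ r ≥ 95 by omega), if_neg (show ¬ r ≥ 90 by omega), if_neg (show ¬ r ≥ 85 by omega), if_neg (show ¬ r ≥ 80 by omega), if_neg (show ¬ r ≥ 75 by omega), if_neg (show ¬ r ≥ 70 by omega), if_neg (show ¬ r ≥ 65 by omega), if_neg (show ¬ r ≥ 60 by omega), if_neg (show ¬ r ≥ 55 by omega), if_neg (show ¬ r ≥ 50 by omega), if_pos (show r ≥ 45 by omega),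
                  if_neg (show ¬ r < 0 by omega), if_neg (show ¬ r < 30 by omega),
                  if_neg (show ¬ r ≥ 100 by omega),
                  show PySem.Int.floordiv r 5 = 9 from (PySem.Int.floordiv_eq_iff_of_pos (by omega)).mpr (by omega)]
              decide
            · by_cases hb10 : r < 55
              · rw [if_neg (show ¬ r ≥ 100 by omega), if_neg (show ¬ r ≥ 95 by omega), if_neg (show ¬ r ≥ 90 by omega), if_neg (show ¬ r ≥ 85 by omega), if_neg (show ¬ r ≥ 80 by omega), if_neg (show ¬ r ≥ 75 by omega), if_neg (show ¬ r ≥ 70 by omega), if_neg (show ¬ r ≥ 65 by omega), if_neg (show ¬ r ≥ 60 by omega), if_neg (show ¬ r ≥ 55 by omega), if_pos (show r ≥ 50 by omega),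
                    if_neg (show ¬ r < 0 by omega), if_neg (show ¬ r < 30 by omega),
                    if_neg (show ¬ r ≥ 100 by omega),
                    show PySem.Int.floordiv r 5 = 10 from (PySem.Int.floordiv_eq_iff_of_pos (by omega)).mpr (by omega)]
                decide
              · by_cases hb11 : r < 60
                · rw [if_neg (show ¬ r ≥ 100 by omega), if_neg (show ¬ r ≥ 95 by omega), if_neg (show ¬ r ≥ 90 by omega), if_neg (show ¬ r ≥ 85 by omega), if_neg (show ¬ r ≥ 80 by omega), if_neg (show ¬ r ≥ 75 by omega), if_neg (show ¬ r ≥ 70 by omega), if_neg (show ¬ r ≥ 65 by omega), if_neg (show ¬ r ≥ 60 by omega), if_pos (show r ≥ 55 by omega),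
                      if_neg (show ¬ r < 0 by omega), if_neg (show ¬ r < 30 by omega),
                      if_neg (show ¬ r ≥ 100 by omega),
                      show PySem.Int.floordiv r 5 = 11 from (PySem.Int.floordiv_eq_iff_of_pos (by omega)).mpr (by omega)]
                  decide
                · by_cases hb12 : r < 65
                  · rw [if_neg (show ¬ r ≥ 100 by omega), if_neg (show ¬ r ≥ 95 by omega), if_neg (show ¬ r ≥ 90 by omega), if_neg (show ¬ r ≥ 85 by omega), if_neg (show ¬ r ≥ 80 by omega), if_neg (show ¬ r ≥ 75 by omega), if_neg (show ¬ r ≥ 70 by omega), if_neg (show ¬ r ≥ 65 by omega), if_pos (show r ≥ 60 by omega),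
                        if_neg (show ¬ r < 0 by omega), if_neg (show ¬ r < 30 by omega),
                        if_neg (show ¬ r ≥ 100 by omega),
                        show PySem.Int.floordiv r 5 = 12 from (PySem.Int.floordiv_eq_iff_of_pos (by omega)).mpr (by omega)]
                    decide
                  · by_cases hb13 : r < 70
                    · rw [if_neg (show ¬ r ≥ 100 by omega), if_neg (show ¬ r ≥ 95 by omega), if_neg (show ¬ r ≥ 90 by omega), if_neg (show ¬ r ≥ 85 by omega), if_neg (show ¬ r ≥ 80 by omega), if_neg (show ¬ r ≥ 75 by omega), if_neg (show ¬ r ≥ 70 by omega), if_pos (show r ≥ 65 by omega),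
                          if_neg (show ¬ r < 0 by omega), if_neg (show ¬ r < 30 by omega),
                          if_neg (show ¬ r ≥ 100 by omega),
                          show PySem.Int.floordiv r 5 = 13 from (PySem.Int.floordiv_eq_iff_of_pos (by omega)).mpr (by omega)]
                      decide
                    · by_cases hb14 : r < 75
                      · rw [if_neg (show ¬ r ≥ 100 by omega), if_neg (show ¬ r ≥ 95 by omega), if_neg (show ¬ r ≥ 90 by omega), if_neg (show ¬ r ≥ 85 by omega), if_neg (show ¬ r ≥ 80 by omega), if_neg (show ¬ r ≥ 75 by omega), if_pos (show r ≥ 70 by omega),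
                            if_neg (show ¬ r < 0 by omega), if_neg (show ¬ r < 30 by omega),
                            if_neg (show ¬ r ≥ 100 by omega),
                            show PySem.Int.floordiv r 5 = 14 from (PySem.Int.floordiv_eq_iff_of_pos (by omega)).mpr (by omega)]
                        decide
                      · by_cases hb15 : r < 80
                        · rw [if_neg (show ¬ r ≥ 100 by omega), if_neg (show ¬ r ≥ 95 by omega), if_neg (show ¬ r ≥ 90 by omega), if_neg (show ¬ r ≥ 85 by omega), if_neg (show ¬ r ≥ 80 by omega), if_pos (show r ≥ 75 by omega),
                              if_neg (show ¬ r < 0 by omega), if_neg (show ¬ r < 30 by omega),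
                              if_neg (show ¬ r ≥ 100 by omega),
                              show PySem.Int.floordiv r 5 = 15 from (PySem.Int.floordiv_eq_iff_of_pos (by omega)).mpr (by omega)]
                          decide
                        · by_cases hb16 : r < 85
                          · rw [if_neg (show ¬ r ≥ 100 by omega), if_neg (show ¬ r ≥ 95 by omega), if_neg (show ¬ r ≥ 90 by omega), if_neg (show ¬ r ≥ 85 by omega), if_pos (show r ≥ 80 by omega),
                                if_neg (show ¬ r < 0 by omega), if_neg (show ¬ r < 30 by omega),
                                if_neg (show ¬ r ≥ 100 by omega),
                                show PySem.Int.floordiv r 5 = 16 from (PySem.Int.floordiv_eq_iff_of_pos (by omega)).mpr (by omega)]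
                            decide
                          · by_cases hb17 : r < 90
                            · rw [if_neg (show ¬ r ≥ 100 by omega), if_neg (show ¬ r ≥ 95 by omega), if_neg (show ¬ r ≥ 90 by omega), if_pos (show r ≥ 85 by omega),
                                  if_neg (show ¬ r < 0 by omega), if_neg (show ¬ r < 30 by omega),
                                  if_neg (show ¬ r ≥ 100 by omega),
                                  show PySem.Int.floordiv r 5 = 17 from (PySem.Int.floordiv_eq_iff_of_pos (by omega)).mpr (by omega)]
                              decide
                            · by_cases hb18 : r < 95
                              · rw [if_neg (show ¬ r ≥ 100 by omega), if_neg (show ¬ r ≥ 95 by omega), if_pos (show r ≥ 90 by omega),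
                                    if_neg (show ¬ r < 0 by omega), if_neg (show ¬ r < 30 by omega),
                                    if_neg (show ¬ r ≥ 100 by omega),
                                    show PySem.Int.floordiv r 5 = 18 from (PySem.Int.floordiv_eq_iff_of_pos (by omega)).mpr (by omega)]
                                decide
                              · rw [if_neg (show ¬ r ≥ 100 by omega), if_pos (show r ≥ 95 by omega),
                                    if_neg (show ¬ r < 0 by omega), if_neg (show ¬ r < 30 by omega),
                                    if_neg (show ¬ r ≥ 100 by omega),
                                    show PySem.Int.floordiv r 5 = 19 from (PySem.Int.floordiv_eq_iff_of_pos (by omega)).mpr (by omega)]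
                                decide

-- ===== VERDICT (by name: the statement is the Claim_ definition above) =====
theorem converti_a_lettera_spec : Claim_equal_converti_a_lettera := by
  intro r _ hpre
  exact pv_main r hpre
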